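-- pv_equiv track=rewrite | github.com/JanLetovanec/TabTex | table_funcs.py | get_table_header
-- ===== SOURCE A (Python) =====
-- def get_table_header(start, end_excluded):
--     """ Get the header row for table """
--     row = []
--     for i in range(start - 1, end_excluded):
--         if i < start:
--             row.append(None)
--         else:
--             row.append(i)
--     return row
-- ===== SOURCE B (Python) =====
-- def get_table_header(start, end_excluded):
--     """ Get the header row for table """
--     row = []
--     i = end_excluded - 1
--     while i >= start:
--         row.append(i)
--         i -= 1
--     row.reverse()
--     if end_excluded >= start:
--         row.insert(0, None)
--     return row
-- ===== Notes on version B (the rewrite author's own statement) =====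
-- stated objective: alternative
-- what changed: B builds the numeric tail backwards (from end_excluded-1 down to start) with a while loop, reverses it, and then prepends the single None slot when the span is nonempty, instead of A's forward range loop with a per-iteration None-vs-value branch.
import Mathlib
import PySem

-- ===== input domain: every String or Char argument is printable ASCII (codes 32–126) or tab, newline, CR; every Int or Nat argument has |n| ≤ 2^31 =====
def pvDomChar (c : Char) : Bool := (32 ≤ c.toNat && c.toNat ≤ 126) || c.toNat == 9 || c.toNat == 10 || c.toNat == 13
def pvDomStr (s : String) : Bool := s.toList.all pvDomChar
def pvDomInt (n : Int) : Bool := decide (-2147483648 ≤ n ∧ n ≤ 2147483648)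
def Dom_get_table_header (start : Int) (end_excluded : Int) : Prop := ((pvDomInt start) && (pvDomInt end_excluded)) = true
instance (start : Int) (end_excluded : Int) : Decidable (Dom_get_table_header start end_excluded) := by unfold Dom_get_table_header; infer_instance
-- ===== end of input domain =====

-- ===== PORT A =====
-- for i in range(start-1, end_excluded): row.append(None if i < start else i)
def get_table_header (start : Int) (end_excluded : Int) : List (Option Int) :=
  (PySem.List.pyRange (start - 1) end_excluded 1).foldl
    (fun row i => row ++ [if i < start then none else some i]) []

-- ===== PORT B =====
-- B: while i >= start: row.append(i); i -= 1   — builds the numeric tail backwards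
def get_table_header_altLoop (start : Int) (i : Int) (row : List (Option Int)) : List (Option Int) :=
  if _h : start ≤ i then get_table_header_altLoop start (i - 1) (row ++ [some i]) else row
termination_by (i + 1 - start).toNat
decreasing_by omega

-- then row.reverse(); if end_excluded >= start: row.insert(0, None)
def get_table_header_alt (start : Int) (end_excluded : Int) : List (Option Int) :=
  let row := (get_table_header_altLoop start (end_excluded - 1) []).reverse
  if start ≤ end_excluded then none :: row else row

-- ===== PRECONDITION & SPEC =====
def Spec_get_table_header (start : Int) (end_excluded : Int) (out : List (Option Int)) : Prop := out = get_table_header_alt start end_excluded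
instance (start : Int) (end_excluded : Int) (out : List (Option Int)) : Decidable (Spec_get_table_header start end_excluded out) := by unfold Spec_get_table_header; infer_instance

-- ===== CLAIM =====
def Claim_equal_get_table_header : Prop := ∀ (start : Int) (end_excluded : Int), Dom_get_table_header start end_excluded → Spec_get_table_header start end_excluded (get_table_header start end_excluded)

-- ===== LEMMAS AND PROOFS =====
-- A's foldl-append loop is a map
lemma foldl_app_map (f : Int → Option Int) (l : List Int) (acc : List (Option Int)) :
    l.foldl (fun row i => row ++ [f i]) acc = acc ++ l.map f := by
  induction l generalizing acc with
  | nil => simp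
  | cons x xs ih => simp [List.foldl, ih]

-- past the head, A's branch never fires
lemma map_tail (start e : Int) :
    (PySem.List.pyRange start e 1).map (fun i => if i < start then none else some i)
      = (PySem.List.pyRange start e 1).map some := by
  apply List.map_congr_left
  intro i hi
  have := (PySem.List.mem_pyRange_one).mp hi
  simp [not_lt.mpr this.1]

-- the backwards loop builds the reversed ascending range
lemma altLoop_eq (start : Int) : ∀ (n : Nat) (i : Int) (acc : List (Option Int)),
    (i + 1 - start).toNat = n →
    get_table_header_altLoop start i acc
      = acc ++ ((PySem.List.pyRange start (i + 1) 1).map some).reverse := by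
  intro n
  induction n with
  | zero =>
    intro i acc hn
    rw [get_table_header_altLoop]
    have hlt : ¬ start ≤ i := by omega
    rw [dif_neg hlt, PySem.List.pyRange_one_eq_nil (by omega)]
    simp
  | succ m ih =>
    intro i acc hn
    rw [get_table_header_altLoop]
    by_cases h : start ≤ i
    · rw [dif_pos h, ih (i - 1) (acc ++ [some i]) (by omega),
        PySem.List.pyRange_one_succ_right h]
      simp
    · rw [dif_neg h, PySem.List.pyRange_one_eq_nil (by omega)]
      simp

-- ===== VERDICT =====
theorem get_table_header_spec : Claim_equal_get_table_header := by
  intro start e _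
  unfold Spec_get_table_header get_table_header get_table_header_alt
  rw [foldl_app_map, altLoop_eq start ((e - 1) + 1 - start).toNat (e - 1) [] rfl]
  simp only [List.nil_append, List.reverse_reverse, show e - 1 + 1 = e from by omega]
  by_cases h : start ≤ e
  · rw [if_pos h, PySem.List.pyRange_one_cons (by omega : start - 1 < e),
      show start - 1 + 1 = start from by omega]
    simp only [List.map_cons]
    rw [if_pos (by omega : start - 1 < start), map_tail]
  · rw [if_neg h, PySem.List.pyRange_one_eq_nil (by omega),
      PySem.List.pyRange_one_eq_nil (by omega)]
    simp
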